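-- pv_equiv track=rewrite | github.com/matthewmckenna/advent2018 | day02.py | count_valid_strings
-- ===== SOURCE A (Python) =====
-- from collections import Counter
-- from typing import Iterator, Tuple
--
-- def count_valid_strings(strings: Iterator[str]) -> int:
--     """count strings which contain two or three of the same letters"""
--     # initialise a counter for strings with letters occuring
--     # two or three times
--     c = Counter({'two': 0, 'three': 0})
--
--     for s in strings:
--         counts = set(Counter(s).values())
--         if 2 in counts:
--             c['two'] += 1
--         if 3 in counts:
--             c['three'] += 1
--
--     return c['two'] * c['three']
-- ===== SOURCE B (Python) =====
-- def count_valid_strings(strings):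
--     """count strings which contain two or three of the same letters"""
--     twos = threes = 0
--     for s in strings:
--         t = sorted(s)
--         saw2 = saw3 = False
--         i = 0
--         while i < len(t):
--             j = i + 1
--             while j < len(t) and t[j] == t[i]:
--                 j += 1
--             if j - i == 2:
--                 saw2 = True
--             if j - i == 3:
--                 saw3 = True
--             i = j
--         twos += saw2
--         threes += saw3
--     return twos * threes
-- ===== Notes on version B (the rewrite author's own statement) =====
-- stated objective: faster
-- what changed: Replaces hash-based frequency counting (a Counter per string plus a set of its values, accumulated in a Counter dict) by sorting each string and scanning it once with two indices to measure run lengths, flagging a run of length 2 or 3; tallies are plain integers.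
import Mathlib
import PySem

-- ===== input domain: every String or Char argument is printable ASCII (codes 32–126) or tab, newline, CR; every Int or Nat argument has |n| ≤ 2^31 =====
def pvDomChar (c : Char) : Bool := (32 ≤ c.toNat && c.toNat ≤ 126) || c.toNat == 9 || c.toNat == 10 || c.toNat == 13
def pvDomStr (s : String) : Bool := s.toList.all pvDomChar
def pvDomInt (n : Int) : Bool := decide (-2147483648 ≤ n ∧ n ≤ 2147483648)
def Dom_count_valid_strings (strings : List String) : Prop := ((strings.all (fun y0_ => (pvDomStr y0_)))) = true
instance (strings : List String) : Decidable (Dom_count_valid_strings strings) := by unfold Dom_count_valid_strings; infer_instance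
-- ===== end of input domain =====

-- B replaces A's per-string Counter hash and Counter-dict accumulator by sorting each
-- string and scanning runs of equal adjacent characters (objective: alternative).

-- ===== PORT A =====
-- body of A's for-loop: counts = set(Counter(s).values()); c['two'] += 1 / c['three'] += 1
def stepA (c : PySem.Dict String Int) (s : String) : PySem.Dict String Int :=
  let counts := PySem.Set.ofList (PySem.Dict.counter s.toList).values
  let c := if counts.contains 2 then c.modify "two" 0 (· + 1) else c
  if counts.contains 3 then c.modify "three" 0 (· + 1) else c

def count_valid_strings (strings : List String) : Int :=
  let c0 : PySem.Dict String Int := (PySem.Dict.empty.insert "two" 0).insert "three" 0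
  let c := strings.foldl stepA c0
  c.getD "two" 0 * c.getD "three" 0

-- ===== PORT B =====
-- B's while loop over the sorted string: at position i the inner while advances j past
-- the run of t[i]; here the remaining suffix is the state, the run is head + takeWhile.
def scanRuns : List Char → Bool → Bool → Bool × Bool
  | [], saw2, saw3 => (saw2, saw3)
  | a :: rest, saw2, saw3 =>
      let run := 1 + (rest.takeWhile (fun c => c == a)).length
      scanRuns (rest.dropWhile (fun c => c == a))
        (saw2 || (run == 2)) (saw3 || (run == 3))
termination_by l _ _ => l.length
decreasing_by
  exact Nat.lt_succ_of_le (List.length_dropWhile_le _ _)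

-- body of B's for-loop: sort s, scan runs, add the two booleans
def stepB (acc : Int × Int) (s : String) : Int × Int :=
  let r := scanRuns (PySem.List.sorted s.toList (fun c => c) false) false false
  (acc.1 + (if r.1 then 1 else 0), acc.2 + (if r.2 then 1 else 0))

def count_valid_strings_alt (strings : List String) : Int :=
  let p := strings.foldl stepB (0, 0)
  p.1 * p.2

-- ===== PRECONDITION & SPEC =====
def Spec_count_valid_strings (strings : List String) (out : Int) : Prop := out = count_valid_strings_alt strings
instance (strings : List String) (out : Int) : Decidable (Spec_count_valid_strings strings out) := by unfold Spec_count_valid_strings; infer_instance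

-- ===== CLAIM (what is proved, stated in full; the proofs are below) =====
def Claim_equal_count_valid_strings : Prop := ∀ (strings : List String), Dom_count_valid_strings strings → Spec_count_valid_strings strings (count_valid_strings strings)

-- ===== LEMMAS AND PROOFS =====

-- the common characterisation: s has some character occurring exactly k times
def hasRun (s : String) (k : Nat) : Bool :=
  s.toList.any (fun c => s.toList.count c == k)

-- membership in a set built from a mapped list is an 'any' over the original list
lemma contains_ofList_map {α β : Type} [BEq β] [LawfulBEq β] (l : List α) (f : α → β) (k : β) :
    (PySem.Set.ofList (l.map f)).contains k = l.any (fun a => f a == k) := by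
  rw [Bool.eq_iff_iff]
  simp only [PySem.Set.contains_iff, PySem.Set.mem_ofList, List.any_eq_true,
    List.mem_map, beq_iff_eq]

-- A's per-string test 'k in set(Counter(s).values())' is hasRun s k
lemma perstring_A (s : String) (k : Nat) :
    (PySem.Set.ofList (PySem.Dict.counter s.toList).values).contains (k : Int) = hasRun s k := by
  have hv : (PySem.Dict.counter (κ := Char) s.toList).values
      = (PySem.Dict.counter s.toList).keys.map
          (fun c => (PySem.Dict.counter s.toList).getD c 0) :=
    PySem.Dict.values_eq_map_keys _ (PySem.Dict.nodup_keys_counter _) 0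
  rw [hasRun, hv, PySem.Dict.keys_counter]
  simp only [PySem.Dict.getD_counter]
  rw [contains_ofList_map]
  have : ∀ c : Char, ((s.toList.count c : Int) == (k : Int)) = (s.toList.count c == k) := by
    intro c; simp
  simp only [this]
  rw [Bool.eq_iff_iff]
  simp [List.any_eq_true]

-- in a sorted list whose elements are all ≥ a, the a's are an initial run
lemma filter_eq_takeWhile (a : Char) (l : List Char)
    (hge : ∀ x ∈ l, a ≤ x) (hs : l.Pairwise (· ≤ ·)) :
    l.filter (fun c => c == a) = l.takeWhile (fun c => c == a) := by
  induction l with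
  | nil => rfl
  | cons b t ih =>
    rcases List.pairwise_cons.mp hs with ⟨hbt, ht⟩
    by_cases hba : b = a
    · subst hba
      simp only [List.filter_cons, List.takeWhile_cons, beq_self_eq_true, if_pos]
      rw [ih (fun x hx => hge x (List.mem_cons_of_mem _ hx)) ht]
    · have hlt : a < b := lt_of_le_of_ne (hge b (List.mem_cons_self)) (Ne.symm hba)
      have hnone : ∀ x ∈ t, ¬ (x == a) = true := by
        intro x hx h
        have : x = a := by simpa using h
        exact absurd (lt_of_lt_of_le hlt (hbt x hx)) (by simp [this])
      simp only [List.filter_cons, List.takeWhile_cons, beq_iff_eq, hba,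
        List.filter_eq_nil_iff.mpr hnone]
      simp

-- the scan on a sorted list reports exactly 'some run length equals 2 / 3'
lemma scanRuns_sorted_aux : ∀ (n : Nat) (t : List Char), t.length ≤ n → t.Pairwise (· ≤ ·) →
    ∀ s2 s3 : Bool, scanRuns t s2 s3 =
      (s2 || t.any (fun c => t.count c == 2), s3 || t.any (fun c => t.count c == 3)) := by
  intro n
  induction n with
  | zero =>
    intro t ht _ s2 s3
    have : t = [] := List.eq_nil_of_length_eq_zero (Nat.le_zero.mp ht)
    subst this; simp [scanRuns]
  | succ n ih =>
    intro t ht hp s2 s3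
    cases t with
    | nil => simp [scanRuns]
    | cons a rest =>
      rcases List.pairwise_cons.mp hp with ⟨hge, hrest⟩
      set tk := rest.takeWhile (fun c => c == a) with htk
      set dp := rest.dropWhile (fun c => c == a) with hdp
      have hsplit : tk ++ dp = rest := List.takeWhile_append_dropWhile
      have htkall : ∀ x ∈ tk, x = a := by
        intro x hx
        simpa using List.mem_takeWhile_imp hx
      have hdps : dp.Pairwise (· ≤ ·) := hrest.sublist (List.dropWhile_sublist _)
      have hdplen : dp.length ≤ n := by
        have h1 : dp.length ≤ rest.length := (List.dropWhile_sublist _).length_le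
        have h2 : rest.length ≤ n := by simpa using Nat.le_of_succ_le_succ ht
        omega
      have hcount_rest : rest.count a = tk.length := by
        have : rest.filter (fun c => c == a) = tk := filter_eq_takeWhile a rest hge hrest
        rw [List.count_eq_countP, List.countP_eq_length_filter, this]
      have hcount_tk : tk.count a = tk.length :=
        List.count_eq_length.mpr (fun b hb => (htkall b hb).symm)
      have hcount_dp : dp.count a = 0 := by
        have : rest.count a = tk.count a + dp.count a := by
          rw [← hsplit, List.count_append]
        omega
      have hna : a ∉ dp := List.count_eq_zero.mp hcount_dp
      have hcnt : ∀ c ∈ dp, (a :: rest).count c = dp.count c := by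
        intro c hc
        have hca : c ≠ a := fun h => hna (h ▸ hc)
        have htc : tk.count c = 0 :=
          List.count_eq_zero.mpr (fun h => hca (htkall c h))
        rw [List.count_cons, ← hsplit, List.count_append, htc]
        simp [Ne.symm hca]
      have hheadcount : (a :: rest).count a = 1 + tk.length := by
        rw [List.count_cons, hcount_rest]
        simp [Nat.add_comm]
      have hany : ∀ k : Nat, (a :: rest).any (fun c => (a :: rest).count c == k)
          = (((a :: rest).count a == k) || dp.any (fun c => dp.count c == k)) := by
        intro k
        rw [Bool.eq_iff_iff]
        simp only [List.any_eq_true, List.mem_cons, Bool.or_eq_true, beq_iff_eq]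
        constructor
        · rintro ⟨c, hc | hc, hck⟩
          · exact Or.inl (hc ▸ hck)
          · rw [← hsplit, List.mem_append] at hc
            rcases hc with hc | hc
            · exact Or.inl ((htkall c hc) ▸ hck)
            · exact Or.inr ⟨c, hc, (hcnt c hc) ▸ hck⟩
        · rintro (h | ⟨c, hc, hck⟩)
          · exact ⟨a, Or.inl rfl, h⟩
          · refine ⟨c, Or.inr ?_, (hcnt c hc).symm ▸ hck⟩
            rw [← hsplit, List.mem_append]; exact Or.inr hc
      have hstep : scanRuns (a :: rest) s2 s3
          = scanRuns dp (s2 || (1 + tk.length == 2)) (s3 || (1 + tk.length == 3)) := by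
        rw [scanRuns]
      rw [hstep, ih dp hdplen hdps, hany 2, hany 3, hheadcount]
      simp [Bool.or_assoc]

-- invariant of A's fold: the dict tracks the two counts
lemma fold_invA (l : List String) (d : PySem.Dict String Int) :
    (l.foldl stepA d).getD "two" 0
        = d.getD "two" 0 + (l.countP (fun s => hasRun s 2) : Nat)
    ∧ (l.foldl stepA d).getD "three" 0
        = d.getD "three" 0 + (l.countP (fun s => hasRun s 3) : Nat) := by
  induction l generalizing d with
  | nil => simp
  | cons s t ih =>
    obtain ⟨ih2, ih3⟩ := ih (stepA d s)
    have hstep2 : (stepA d s).getD "two" 0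
        = d.getD "two" 0 + (if hasRun s 2 then 1 else 0) := by
      rw [stepA, ← show ((2:Nat):Int) = 2 from rfl, perstring_A]
      split_ifs with h2 h3 h3 <;>
        simp_all [PySem.Dict.getD_modify_self, PySem.Dict.getD_modify]
    have hstep3 : (stepA d s).getD "three" 0
        = d.getD "three" 0 + (if hasRun s 3 then 1 else 0) := by
      rw [stepA, ← show ((3:Nat):Int) = 3 from rfl, perstring_A]
      split_ifs with h2 h3 h3 <;>
        simp_all [PySem.Dict.getD_modify_self, PySem.Dict.getD_modify]
    refine ⟨?_, ?_⟩
    · rw [List.foldl_cons, ih2, hstep2, List.countP_cons]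
      split_ifs <;> push_cast <;> ring
    · rw [List.foldl_cons, ih3, hstep3, List.countP_cons]
      split_ifs <;> push_cast <;> ring

-- per string, B's scan of the sorted string is hasRun
lemma perstring_B (s : String) :
    scanRuns (PySem.List.sorted s.toList (fun c => c) false) false false
      = (hasRun s 2, hasRun s 3) := by
  set t := PySem.List.sorted s.toList (fun c => c) false with ht
  have hperm : t.Perm s.toList := PySem.List.sorted_perm _ _ _
  have hsorted : t.Pairwise (· ≤ ·) := PySem.List.sorted_pairwise _ _
  rw [scanRuns_sorted_aux t.length t le_rfl hsorted]
  have hany : ∀ k : Nat, t.any (fun c => t.count c == k) = hasRun s k := by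
    intro k
    rw [hasRun, Bool.eq_iff_iff]
    simp only [List.any_eq_true]
    constructor
    · rintro ⟨c, hc, h⟩
      exact ⟨c, hperm.mem_iff.mp hc, by rwa [← hperm.count_eq]⟩
    · rintro ⟨c, hc, h⟩
      exact ⟨c, hperm.mem_iff.mpr hc, by rwa [hperm.count_eq]⟩
  simp [hany]

-- invariant of B's fold
lemma fold_invB (l : List String) (p : Int × Int) :
    l.foldl stepB p
      = (p.1 + (l.countP (fun s => hasRun s 2) : Nat),
         p.2 + (l.countP (fun s => hasRun s 3) : Nat)) := by
  induction l generalizing p with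
  | nil => simp
  | cons s t ih =>
    rw [List.foldl_cons, ih, stepB, perstring_B]
    simp only [List.countP_cons, Prod.mk.injEq]
    refine ⟨?_, ?_⟩ <;> (split_ifs <;> push_cast <;> ring)

-- ===== VERDICT (by name: the statement is the Claim_ definition above) =====
theorem count_valid_strings_spec : Claim_equal_count_valid_strings := by
  intro strings _
  unfold Spec_count_valid_strings
  simp only [count_valid_strings, count_valid_strings_alt]
  obtain ⟨h2, h3⟩ := fold_invA strings ((PySem.Dict.empty.insert "two" 0).insert "three" 0)
  rw [h2, h3, fold_invB,
    show ((PySem.Dict.empty.insert "two" 0).insert "three" 0 : PySem.Dict String Int).getD "two" 0 = 0 from by decide,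
    show ((PySem.Dict.empty.insert "two" 0).insert "three" 0 : PySem.Dict String Int).getD "three" 0 = 0 from by decide]
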